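-- pv_equiv track=rewrite | github.com/gabesenese/A.L.I.C.E | tools/auditing/learning_data_qa_gate.py | _has_cross_copy_critical_class
-- ===== SOURCE A (Python) =====
-- from typing import Any, Dict, List, Optional
--
-- def _has_cross_copy_critical_class(report: Dict[str, Any]) -> bool:
--     critical_codes_in_data = set()
--     critical_codes_in_app_data = set()
--
--     for finding in report.get("findings", []):
--         if finding.get("severity") != "critical":
--             continue
--         code = str(finding.get("code", ""))
--         path = str(finding.get("path", ""))
--         if path.startswith("data/"):
--             critical_codes_in_data.add(code)
--         elif path.startswith("app/data/"):
--             critical_codes_in_app_data.add(code)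
--
--     return bool(critical_codes_in_data & critical_codes_in_app_data)
-- ===== SOURCE B (Python) =====
-- def _has_cross_copy_critical_class(report):
--     # Single pass with one code->path-class map and early exit on the first cross pair.
--     seen = {}
--     for finding in report.get("findings", []):
--         if finding.get("severity") != "critical":
--             continue
--         code = str(finding.get("code", ""))
--         path = str(finding.get("path", ""))
--         if path.startswith("data/"):
--             cls = "data"
--         elif path.startswith("app/data/"):
--             cls = "app_data"
--         else:
--             continue
--         prev = seen.get(code)
--         if prev is None:
--             seen[code] = cls
--         elif prev != cls:
--             return True
--     return False
-- ===== Notes on version B (the rewrite author's own statement) =====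
-- stated objective: alternative
-- what changed: Replaces the build-both-sets-then-intersect pass with a single pass maintaining one code->path-class dict that returns True as soon as a critical code is seen under the opposite path class.
import Mathlib
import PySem

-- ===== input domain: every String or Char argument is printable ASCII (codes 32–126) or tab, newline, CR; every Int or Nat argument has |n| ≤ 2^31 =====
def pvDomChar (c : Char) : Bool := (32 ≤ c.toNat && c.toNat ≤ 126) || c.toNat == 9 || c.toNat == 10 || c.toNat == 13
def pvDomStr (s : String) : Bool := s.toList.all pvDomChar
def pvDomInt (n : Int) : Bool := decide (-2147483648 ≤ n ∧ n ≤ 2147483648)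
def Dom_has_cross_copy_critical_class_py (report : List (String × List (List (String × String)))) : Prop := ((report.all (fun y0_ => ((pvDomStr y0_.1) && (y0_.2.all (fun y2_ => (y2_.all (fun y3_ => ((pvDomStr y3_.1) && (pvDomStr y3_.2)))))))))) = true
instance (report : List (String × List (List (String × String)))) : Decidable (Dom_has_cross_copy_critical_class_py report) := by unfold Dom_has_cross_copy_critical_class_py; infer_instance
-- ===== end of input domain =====

-- ===== PORT A =====
-- B: same result by a single pass with one code->class dict and early exit (alternative decomposition).
def pvClsA (st : PySem.Set String × PySem.Set String) (f : List (String × String)) :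
    PySem.Set String × PySem.Set String :=
  if (PySem.Dict.mk f).get? "severity" ≠ some "critical" then st
  else
    let code := (PySem.Dict.mk f).getD "code" ""
    let path := (PySem.Dict.mk f).getD "path" ""
    if PySem.Str.startswith path "data/" then (PySem.Set.add st.1 code, st.2)
    else if PySem.Str.startswith path "app/data/" then (st.1, PySem.Set.add st.2 code)
    else st

def has_cross_copy_critical_class_py (report : List (String × List (List (String × String)))) : Bool :=
  let findings := (PySem.Dict.mk report).getD "findings" []
  let st := findings.foldl pvClsA (PySem.Set.empty, PySem.Set.empty)
  !(PySem.Set.inter st.1 st.2).isEmpty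

-- ===== PORT B =====
def pvLoopB (seen : PySem.Dict String String) : List (List (String × String)) → Bool
  | [] => false
  | f :: rest =>
    if (PySem.Dict.mk f).get? "severity" ≠ some "critical" then pvLoopB seen rest
    else
      let code := (PySem.Dict.mk f).getD "code" ""
      let path := (PySem.Dict.mk f).getD "path" ""
      let cls? : Option String :=
        if PySem.Str.startswith path "data/" then some "data"
        else if PySem.Str.startswith path "app/data/" then some "app_data"
        else none
      match cls? with
      | none => pvLoopB seen rest
      | some cls =>
        match seen.get? code with
        | none => pvLoopB (seen.insert code cls) rest
        | some prev => if prev ≠ cls then true else pvLoopB seen rest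

def has_cross_copy_critical_class_py_alt (report : List (String × List (List (String × String)))) : Bool :=
  pvLoopB PySem.Dict.empty ((PySem.Dict.mk report).getD "findings" [])

-- ===== PRECONDITION & SPEC =====
def Spec_has_cross_copy_critical_class_py (report : List (String × List (List (String × String)))) (out : Bool) : Prop := out = has_cross_copy_critical_class_py_alt report
instance (report : List (String × List (List (String × String)))) (out : Bool) : Decidable (Spec_has_cross_copy_critical_class_py report out) := by unfold Spec_has_cross_copy_critical_class_py; infer_instance

-- ===== CLAIM (what is proved, stated in full; the proofs are below) =====
def Claim_equal_has_cross_copy_critical_class_py : Prop := ∀ (report : List (String × List (List (String × String)))), Dom_has_cross_copy_critical_class_py report → Spec_has_cross_copy_critical_class_py report (has_cross_copy_critical_class_py report)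

-- ===== LEMMAS AND PROOFS =====

-- invariant tying B's dict to A's pair of sets
def pvInv (seen : PySem.Dict String String) (s1 s2 : PySem.Set String) : Prop :=
  (∀ c, seen.get? c = some "data" ↔ c ∈ s1) ∧
  (∀ c, seen.get? c = some "app_data" ↔ c ∈ s2) ∧
  (∀ c v, seen.get? c = some v → v = "data" ∨ v = "app_data")

theorem pvFoldA_mono1 (fs : List (List (String × String)))
    (st : PySem.Set String × PySem.Set String) {x : String} (h : x ∈ st.1) :
    x ∈ (fs.foldl pvClsA st).1 := by
  induction fs generalizing st with
  | nil => exact h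
  | cons f rest ih =>
      simp only [List.foldl_cons]
      apply ih
      simp only [pvClsA]
      split
      · exact h
      · split
        · exact (PySem.Set.mem_add _ _ _).2 (Or.inl h)
        · split <;> exact h

theorem pvFoldA_mono2 (fs : List (List (String × String)))
    (st : PySem.Set String × PySem.Set String) {x : String} (h : x ∈ st.2) :
    x ∈ (fs.foldl pvClsA st).2 := by
  induction fs generalizing st with
  | nil => exact h
  | cons f rest ih =>
      simp only [List.foldl_cons]
      apply ih
      simp only [pvClsA]
      split
      · exact h
      · split
        · exact h
        · split
          · exact (PySem.Set.mem_add _ _ _).2 (Or.inl h)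
          · exact h

theorem pvInter_nonempty {s1 s2 : PySem.Set String} {x : String}
    (h1 : x ∈ s1) (h2 : x ∈ s2) : (!(PySem.Set.inter s1 s2).isEmpty) = true := by
  have : x ∈ PySem.Set.inter s1 s2 := (PySem.Set.mem_inter _ _ _).2 ⟨h1, h2⟩
  cases hE : (PySem.Set.inter s1 s2) with
  | nil => simp [hE] at this
  | cons a l => simp [List.isEmpty]

theorem pvMain (fs : List (List (String × String)))
    (seen : PySem.Dict String String) (s1 s2 : PySem.Set String)
    (hInv : pvInv seen s1 s2) :
    pvLoopB seen fs =
      !(PySem.Set.inter (fs.foldl pvClsA (s1, s2)).1 (fs.foldl pvClsA (s1, s2)).2).isEmpty := by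
  induction fs generalizing seen s1 s2 with
  | nil =>
      simp only [pvLoopB, List.foldl_nil]
      obtain ⟨h1, h2, _⟩ := hInv
      have hemp : PySem.Set.inter s1 s2 = [] := by
        apply List.eq_nil_iff_forall_not_mem.2
        intro c hc
        obtain ⟨hc1, hc2⟩ := (PySem.Set.mem_inter _ _ _).1 hc
        have e1 := (h1 c).2 hc1
        have e2 := (h2 c).2 hc2
        rw [e1] at e2
        simp at e2
      simp [hemp]
  | cons f rest ih =>
      obtain ⟨h1, h2, h3⟩ := hInv
      simp only [pvLoopB, List.foldl_cons]
      by_cases hs : (PySem.Dict.mk f).get? "severity" ≠ some "critical"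
      · simp only [pvClsA, if_pos hs]
        exact ih seen s1 s2 ⟨h1, h2, h3⟩
      · simp only [pvClsA, if_neg hs]
        set code := (PySem.Dict.mk f).getD "code" "" with hcode
        set path := (PySem.Dict.mk f).getD "path" "" with hpath
        by_cases hd : PySem.Str.startswith path "data/" = true
        · simp only [if_pos hd]
          cases hg : seen.get? code with
          | none =>
              apply ih
              refine ⟨?_, ?_, ?_⟩
              · intro c
                rw [PySem.Dict.get?_insert]
                by_cases hc : c = code
                · subst hc
                  simp [PySem.Set.mem_add]
                · simp only [if_neg hc]
                  rw [h1 c, PySem.Set.mem_add]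
                  constructor
                  · exact Or.inl
                  · rintro (h | h)
                    · exact h
                    · exact absurd h hc
              · intro c
                rw [PySem.Dict.get?_insert]
                by_cases hc : c = code
                · subst hc
                  constructor
                  · intro h; simp at h
                  · intro h
                    exact absurd ((h2 code).2 h) (by simp [hg])
                · simp only [if_neg hc]; exact h2 c
              · intro c v
                rw [PySem.Dict.get?_insert]
                by_cases hc : c = code
                · simp only [if_pos hc]
                  intro h
                  exact Or.inl (Option.some.inj h).symm
                · simp only [if_neg hc]; exact h3 c v
          | some prev =>
              by_cases hne : prev ≠ "data"
              · simp only [if_pos hne]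
                -- prev must be "app_data": code is in s2, and it gets added to s1
                have hprev : prev = "app_data" := by
                  rcases h3 code prev hg with h | h
                  · exact absurd h hne
                  · exact h
                have hc2 : code ∈ s2 := (h2 code).1 (by rw [hg, hprev])
                have hc1 : code ∈ PySem.Set.add s1 code := (PySem.Set.mem_add _ _ _).2 (Or.inr rfl)
                exact (pvInter_nonempty
                  (pvFoldA_mono1 rest _ hc1)
                  (pvFoldA_mono2 rest (PySem.Set.add s1 code, s2) hc2)).symm
              · simp only [if_neg hne]
                rw [not_not] at hne
                subst hne
                apply ih
                refine ⟨?_, ?_, h3⟩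
                · intro c
                  rw [h1 c, PySem.Set.mem_add]
                  constructor
                  · exact Or.inl
                  · rintro (h | h)
                    · exact h
                    · subst h; exact (h1 code).1 hg
                · exact h2
        · simp only [if_neg hd]
          by_cases ha : PySem.Str.startswith path "app/data/" = true
          · simp only [if_pos ha]
            cases hg : seen.get? code with
            | none =>
                apply ih
                refine ⟨?_, ?_, ?_⟩
                · intro c
                  rw [PySem.Dict.get?_insert]
                  by_cases hc : c = code
                  · subst hc
                    constructor
                    · intro h; simp at h
                    · intro h
                      exact absurd ((h1 code).2 h) (by simp [hg])
                  · simp only [if_neg hc]; exact h1 c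
                · intro c
                  rw [PySem.Dict.get?_insert]
                  by_cases hc : c = code
                  · subst hc
                    simp [PySem.Set.mem_add]
                  · simp only [if_neg hc]
                    rw [h2 c, PySem.Set.mem_add]
                    constructor
                    · exact Or.inl
                    · rintro (h | h)
                      · exact h
                      · exact absurd h hc
                · intro c v
                  rw [PySem.Dict.get?_insert]
                  by_cases hc : c = code
                  · simp only [if_pos hc]
                    intro h
                    exact Or.inr (Option.some.inj h).symm
                  · simp only [if_neg hc]; exact h3 c v
            | some prev =>
                by_cases hne : prev ≠ "app_data"
                · simp only [if_pos hne]
                  have hprev : prev = "data" := by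
                    rcases h3 code prev hg with h | h
                    · exact h
                    · exact absurd h hne
                  have hc1 : code ∈ s1 := (h1 code).1 (by rw [hg, hprev])
                  have hc2 : code ∈ PySem.Set.add s2 code := (PySem.Set.mem_add _ _ _).2 (Or.inr rfl)
                  exact (pvInter_nonempty
                    (pvFoldA_mono1 rest (s1, PySem.Set.add s2 code) hc1)
                    (pvFoldA_mono2 rest _ hc2)).symm
                · simp only [if_neg hne]
                  rw [not_not] at hne
                  subst hne
                  apply ih
                  refine ⟨h1, ?_, h3⟩
                  intro c
                  rw [h2 c, PySem.Set.mem_add]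
                  constructor
                  · exact Or.inl
                  · rintro (h | h)
                    · exact h
                    · subst h; exact (h2 code).1 hg
          · simp only [if_neg ha]
            exact ih seen s1 s2 ⟨h1, h2, h3⟩

theorem pvInv_empty : pvInv PySem.Dict.empty [] [] := by
  refine ⟨?_, ?_, ?_⟩ <;> intro c <;> simp [PySem.Dict.get?_empty]

-- ===== VERDICT (by name: the statement is the Claim_ definition above) =====
theorem has_cross_copy_critical_class_py_spec : Claim_equal_has_cross_copy_critical_class_py := by
  intro report _
  unfold Spec_has_cross_copy_critical_class_py has_cross_copy_critical_class_py has_cross_copy_critical_class_py_alt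
  exact (pvMain _ PySem.Dict.empty [] [] pvInv_empty).symm
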